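-- pv_equiv track=rewrite | github.com/VershaKashyap07/MY_DSA_Prep | Sliding Window/Maximum number of vowels in a string of given length.py | maxVowels_Brute
-- ===== SOURCE A (Python) =====
-- def check_vowelCount(s,i,j):
--     cnt = 0
--     for char in s[i:j+1]:
--         if char == 'a' or char =='e' or  char =='i' or char =='o' or char =='u':
--             cnt+=1
--
--     return cnt
--
-- def maxVowels_Brute(s,k):
--     count = 0
--     for i in range(len(s)):
--         for j in range(i, len(s)):
--             if j-i+1 ==k:
--                 count = max(count,check_vowelCount(s,i,j))
--                 break
--
--     return count
-- ===== SOURCE B (Python) =====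
-- VOWELS = ('a', 'e', 'i', 'o', 'u')
--
-- def maxVowels_Brute(s, k):
--     n = len(s)
--     if k < 1 or k > n:
--         return 0
--     cnt = 0
--     for c in s[:k]:
--         if c in VOWELS:
--             cnt += 1
--     best = cnt
--     for i in range(k, n):
--         cnt += (s[i] in VOWELS) - (s[i - k] in VOWELS)
--         if cnt > best:
--             best = cnt
--     return best
-- ===== Notes on version B (the rewrite author's own statement) =====
-- stated objective: faster
-- what changed: Replaced the O(n*k) nested scan (re-counting vowels of each window from scratch) by a single-pass sliding window that updates the vowel count incrementally when the window moves.
import Mathlib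
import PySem

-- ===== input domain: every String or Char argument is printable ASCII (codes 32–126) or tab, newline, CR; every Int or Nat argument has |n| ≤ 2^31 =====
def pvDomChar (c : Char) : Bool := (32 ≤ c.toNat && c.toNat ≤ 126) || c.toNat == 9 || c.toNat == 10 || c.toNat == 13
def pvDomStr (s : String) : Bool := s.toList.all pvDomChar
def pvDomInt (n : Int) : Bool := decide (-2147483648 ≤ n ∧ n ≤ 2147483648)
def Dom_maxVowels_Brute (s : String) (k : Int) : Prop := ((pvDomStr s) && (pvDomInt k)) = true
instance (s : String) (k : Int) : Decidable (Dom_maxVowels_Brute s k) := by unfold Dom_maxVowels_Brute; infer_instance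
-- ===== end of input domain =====

-- B replaces A's O(n*k) re-count of every window by a one-pass sliding window with an incremental vowel count (faster; same return value everywhere).

-- ===== PORT A =====
def isVowelA (c : Char) : Bool := c == 'a' || c == 'e' || c == 'i' || c == 'o' || c == 'u'

-- check_vowelCount(s, i, j): count vowels in s[i:j+1]
def checkVowelCount (cs : List Char) (i j : Int) : Int :=
  (PySem.List.slice cs (some i) (some (j + 1))).foldl
    (fun cnt c => if isVowelA c then cnt + 1 else cnt) 0

-- the inner 'for j in range(i, len(s))' with its break at the first j with j-i+1 == k
def innerA (cs : List Char) (k i : Int) (count : Int) : List Int → Int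
  | [] => count
  | j :: rest => if j - i + 1 = k then max count (checkVowelCount cs i j) else innerA cs k i count rest

def maxVowels_Brute (s : String) (k : Int) : Int :=
  let cs := s.toList
  (PySem.List.pyRange 0 (cs.length : Int) 1).foldl
    (fun count i => innerA cs k i count (PySem.List.pyRange i (cs.length : Int) 1)) 0

-- ===== PORT B =====
def vowelsB : List Char := ['a', 'e', 'i', 'o', 'u']

-- (s[i] in VOWELS) as the int Python's bool arithmetic makes of it
def vowelInt (c : Char) : Int := if vowelsB.contains c then 1 else 0

def maxVowels_Brute_alt (s : String) (k : Int) : Int :=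
  let cs := s.toList
  let n : Int := cs.length
  if k < 1 ∨ k > n then 0
  else
    -- cnt over s[:k]
    let cnt0 := (PySem.List.slice cs none (some k)).foldl
      (fun cnt c => if vowelsB.contains c then cnt + 1 else cnt) 0
    -- for i in range(k, n): cnt += (s[i] in VOWELS) - (s[i-k] in VOWELS); best = max
    let st := (PySem.List.pyRange k n 1).foldl
      (fun (st : Int × Int) i =>
        let cnt := st.1 + vowelInt (PySem.List.pyGetD cs i ' ') - vowelInt (PySem.List.pyGetD cs (i - k) ' ')
        (cnt, if cnt > st.2 then cnt else st.2))
      (cnt0, cnt0)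
    st.2

-- ===== PRECONDITION & SPEC =====
def Spec_maxVowels_Brute (s : String) (k : Int) (out : Int) : Prop := out = maxVowels_Brute_alt s k
instance (s : String) (k : Int) (out : Int) : Decidable (Spec_maxVowels_Brute s k out) := by unfold Spec_maxVowels_Brute; infer_instance

-- ===== CLAIM (what is proved, stated in full; the proofs are below) =====
def Claim_equal_maxVowels_Brute : Prop := ∀ (s : String) (k : Int), Dom_maxVowels_Brute s k → Spec_maxVowels_Brute s k (maxVowels_Brute s k)

-- ===== LEMMAS AND PROOFS =====

-- vowel count (as Int) of the window of width kn starting at t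
def W (cs : List Char) (kn t : Nat) : Int := (((cs.drop t).take kn).countP isVowelA : Nat)



lemma contains_eq_isVowelA (c : Char) : vowelsB.contains c = isVowelA c := by
  simp only [vowelsB, isVowelA, List.contains_cons, List.contains_nil, Bool.or_false, Bool.or_assoc]

lemma maxIf (b c : Int) : (if c > b then c else b) = max b c := by
  by_cases h : c > b <;> simp [max_def] <;> omega

lemma inner_eq_aux (cs : List Char) (k i b : Int) :
    ∀ (m : Nat) (t count : Int), (b - t).toNat = m →
      innerA cs k i count (PySem.List.pyRange t b 1) =
      if t ≤ i + k - 1 ∧ i + k - 1 < b then max count (checkVowelCount cs i (i + k - 1)) else count := by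
  intro m
  induction m with
  | zero =>
    intro t count h
    rw [PySem.List.pyRange_one_eq_nil (by omega), if_neg (by omega)]
    rfl
  | succ m ih =>
    intro t count h
    rw [PySem.List.pyRange_one_cons (by omega)]
    simp only [innerA]
    by_cases hjt : t - i + 1 = k
    · rw [if_pos hjt, if_pos (by omega)]
      have : i + k - 1 = t := by omega
      rw [this]
    · rw [if_neg hjt, ih (t + 1) count (by omega)]
      by_cases hc : t + 1 ≤ i + k - 1 ∧ i + k - 1 < b
      · rw [if_pos hc, if_pos (by omega)]
      · rw [if_neg hc, if_neg (by omega)]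

lemma inner_eq (cs : List Char) (k i b t count : Int) :
    innerA cs k i count (PySem.List.pyRange t b 1) =
    if t ≤ i + k - 1 ∧ i + k - 1 < b then max count (checkVowelCount cs i (i + k - 1)) else count :=
  inner_eq_aux cs k i b (b - t).toNat t count rfl

lemma check_eq_W (cs : List Char) (j kn : Nat) :
    checkVowelCount cs j ((j : Int) + (kn : Int) - 1) = W cs kn j := by
  unfold checkVowelCount
  have h1 : ((j : Int) + (kn : Int) - 1 + 1) = (j : Int) + (kn : Int) := by ring
  rw [h1, PySem.List.slice_natCast_add, PySem.List.foldl_if_add_one]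
  simp [W]

lemma W_nonneg (cs : List Char) (kn t : Nat) : 0 ≤ W cs kn t := by
  unfold W; positivity

lemma W_succ (cs : List Char) (kn m : Nat) (h : kn + m < cs.length) :
    W cs kn (m + 1) = W cs kn m + vowelInt cs[kn + m] - vowelInt cs[m] := by
  have hm : m < cs.length := by omega
  have hdrop : cs.drop m = cs[m] :: cs.drop (m + 1) := List.drop_eq_getElem_cons hm
  have hlen : kn < (cs.drop m).length := by simp; omega
  have e1 : (cs.drop m).take (kn + 1) = cs[m] :: (cs.drop (m + 1)).take kn := by
    rw [hdrop]; rfl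
  have e2 : (cs.drop m).take (kn + 1) = (cs.drop m).take kn ++ [cs[kn + m]] := by
    rw [List.take_add_one]
    congr 1
    have : (cs.drop m)[kn]'hlen = cs[m + kn] := List.getElem_drop ..
    rw [List.getElem?_eq_getElem hlen, this]
    simp [Nat.add_comm]
  have hc : (((cs.drop m).take (kn+1)).countP isVowelA) = (((cs.drop m).take (kn+1)).countP isVowelA) := rfl
  have hcnt : ((cs[m] :: (cs.drop (m + 1)).take kn).countP isVowelA)
      = (((cs.drop m).take kn ++ [cs[kn + m]]).countP isVowelA) := by rw [← e1, e2]
  rw [List.countP_cons, List.countP_append, List.countP_cons, List.countP_nil] at hcnt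
  unfold W vowelInt
  rw [contains_eq_isVowelA, contains_eq_isVowelA]
  by_cases p1 : isVowelA cs[m] <;> by_cases p2 : isVowelA cs[kn + m] <;>
    simp [p1, p2] at hcnt ⊢ <;> omega

lemma B_inv (cs : List Char) (kn : Nat) :
    ∀ (m : Nat), kn + m ≤ cs.length → ∀ (b : Int),
      (List.range m).foldl
        (fun (st : Int × Int) (j : Nat) =>
          let cnt := st.1 + vowelInt (cs.getD (kn + j) ' ') - vowelInt (cs.getD j ' ')
          (cnt, if cnt > st.2 then cnt else st.2)) (W cs kn 0, b)
      = (W cs kn m, (List.range m).foldl (fun c j => max c (W cs kn (j + 1))) b) := by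
  intro m
  induction m with
  | zero => intro _ b; simp
  | succ m ih =>
    intro h b
    rw [List.range_succ, List.foldl_append, List.foldl_append, ih (by omega) b]
    have hlt : kn + m < cs.length := by omega
    have hm : m < cs.length := by omega
    simp only [List.foldl_cons, List.foldl_nil]
    rw [List.getD_eq_getElem cs ' ' hlt, List.getD_eq_getElem cs ' ' hm]
    rw [← W_succ cs kn m hlt, maxIf]

lemma fold_trunc (g : Nat → Int) (m n : Nat) (h : m ≤ n) :
    (List.range n).foldl (fun c j => if j < m then max c (g j) else c) 0
    = (List.range m).foldl (fun c j => max c (g j)) 0 := by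
  obtain ⟨r, rfl⟩ : ∃ r, n = m + r := ⟨n - m, by omega⟩
  rw [List.range_add, List.foldl_append, List.foldl_map]
  have h1 : (List.range m).foldl (fun c j => if j < m then max c (g j) else c) 0
      = (List.range m).foldl (fun c j => max c (g j)) 0 := by
    apply PySem.List.foldl_congr_mem
    intro acc j hj
    rw [List.mem_range] at hj
    rw [if_pos hj]
  rw [h1]
  have h2 : (List.range r).foldl (fun (acc : Int) (x : Nat) => if m + x < m then max acc (g (m + x)) else acc)
      ((List.range m).foldl (fun c j => max c (g j)) 0)
      = (List.range r).foldl (fun acc _ => acc) ((List.range m).foldl (fun c j => max c (g j)) 0) := by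
    apply PySem.List.foldl_congr_mem
    intro acc x _
    rw [if_neg (by omega)]
  rw [h2, PySem.List.foldl_ignore]

lemma range_max_shift (g : Nat → Int) (hg : 0 ≤ g 0) (m : Nat) :
    (List.range (m + 1)).foldl (fun c j => max c (g j)) 0
    = (List.range m).foldl (fun c j => max c (g (j + 1))) (g 0) := by
  rw [List.range_succ_eq_map, List.foldl_cons, List.foldl_map]
  congr 1
  exact max_eq_right hg

lemma maxVowels_eq_alt (s : String) (k : Int) : maxVowels_Brute s k = maxVowels_Brute_alt s k := by
  simp only [maxVowels_Brute, maxVowels_Brute_alt]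
  generalize s.toList = cs
  simp only [inner_eq]
  by_cases h1 : k < 1 ∨ k > (cs.length : Int)
  · rw [if_pos h1]
    have h2 : (PySem.List.pyRange 0 (cs.length : Int) 1).foldl
        (fun count i => if i ≤ i + k - 1 ∧ i + k - 1 < (cs.length : Int) then max count (checkVowelCount cs i (i + k - 1)) else count) 0
        = (PySem.List.pyRange 0 (cs.length : Int) 1).foldl (fun count _ => count) 0 := by
      apply PySem.List.foldl_congr_mem
      intro acc i hi
      rw [PySem.List.mem_pyRange_one] at hi
      rcases h1 with h1 | h1 <;> rw [if_neg (by omega)]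
    rw [h2, PySem.List.foldl_ignore]
  · rw [if_neg h1]
    have hk1 : 1 ≤ k := by omega
    have hkn : k ≤ (cs.length : Int) := by omega
    obtain ⟨kn, rfl⟩ : ∃ kn : Nat, k = (kn : Int) := ⟨k.toNat, by omega⟩
    have hkn1 : 1 ≤ kn := by omega
    have hknn : kn ≤ cs.length := by omega
    -- A side
    have hA : (PySem.List.pyRange 0 (cs.length : Int) 1).foldl
        (fun count i => if i ≤ i + (kn : Int) - 1 ∧ i + (kn : Int) - 1 < (cs.length : Int) then max count (checkVowelCount cs i (i + (kn : Int) - 1)) else count) 0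
        = (List.range (cs.length - kn + 1)).foldl (fun c j => max c (W cs kn j)) 0 := by
      rw [PySem.List.pyRange_zero_nat, List.foldl_map]
      have hstep : (List.range cs.length).foldl
          (fun (count : Int) (j : Nat) => if (j : Int) ≤ (j : Int) + (kn : Int) - 1 ∧ (j : Int) + (kn : Int) - 1 < (cs.length : Int) then max count (checkVowelCount cs j ((j : Int) + (kn : Int) - 1)) else count) 0
          = (List.range cs.length).foldl (fun c j => if j < cs.length - kn + 1 then max c (W cs kn j) else c) 0 := by
        apply PySem.List.foldl_congr_mem
        intro acc j hj
        rw [List.mem_range] at hj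
        by_cases hc : j < cs.length - kn + 1
        · rw [if_pos (by omega), if_pos hc, check_eq_W]
        · rw [if_neg (by omega), if_neg hc]
      rw [hstep, fold_trunc _ _ _ (by omega)]
    rw [hA]
    -- B side
    have hcnt0 : (PySem.List.slice cs none (some (kn : Int))).foldl
        (fun cnt c => if vowelsB.contains c then cnt + 1 else cnt) 0 = W cs kn 0 := by
      rw [PySem.List.slice_to_natCast]
      simp only [contains_eq_isVowelA]
      rw [PySem.List.foldl_if_add_one]
      simp [W]
    rw [hcnt0]
    have hrange : PySem.List.pyRange (kn : Int) (cs.length : Int) 1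
        = (List.range (cs.length - kn)).map (fun j : Nat => (kn : Int) + (j : Int)) := by
      rw [PySem.List.pyRange_one]
      have h3 : ((cs.length : Int) - (kn : Int)).toNat = cs.length - kn := by omega
      rw [h3]
    rw [hrange, List.foldl_map]
    show (List.range (cs.length - kn + 1)).foldl (fun c j => max c (W cs kn j)) 0
        = ((List.range (cs.length - kn)).foldl
            (fun (st : Int × Int) (j : Nat) =>
              let cnt := st.1 + vowelInt (PySem.List.pyGetD cs ((kn : Int) + (j : Int)) ' ')
                  - vowelInt (PySem.List.pyGetD cs ((kn : Int) + (j : Int) - (kn : Int)) ' ')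
              (cnt, if cnt > st.2 then cnt else st.2)) (W cs kn 0, W cs kn 0)).2
    have hBf : (List.range (cs.length - kn)).foldl
        (fun (st : Int × Int) (j : Nat) =>
          let cnt := st.1 + vowelInt (PySem.List.pyGetD cs ((kn : Int) + (j : Int)) ' ')
              - vowelInt (PySem.List.pyGetD cs ((kn : Int) + (j : Int) - (kn : Int)) ' ')
          (cnt, if cnt > st.2 then cnt else st.2)) (W cs kn 0, W cs kn 0)
        = (List.range (cs.length - kn)).foldl
        (fun (st : Int × Int) (j : Nat) =>
          let cnt := st.1 + vowelInt (cs.getD (kn + j) ' ') - vowelInt (cs.getD j ' ')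
          (cnt, if cnt > st.2 then cnt else st.2)) (W cs kn 0, W cs kn 0) := by
      apply PySem.List.foldl_congr_mem
      intro acc j _
      have e1 : ((kn : Int) + (j : Int)) = ((kn + j : Nat) : Int) := by push_cast; ring
      have e2 : (((kn + j : Nat) : Int) - (kn : Int)) = ((j : Nat) : Int) := by push_cast; ring
      simp only [e1, e2, PySem.List.pyGetD_natCast]
    rw [hBf, B_inv cs kn (cs.length - kn) (by omega) (W cs kn 0)]
    rw [show cs.length - kn + 1 = (cs.length - kn) + 1 from rfl, range_max_shift _ (W_nonneg cs kn 0)]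

-- ===== VERDICT (by name: the statement is the Claim_ definition above) =====
theorem maxVowels_Brute_spec : Claim_equal_maxVowels_Brute := by
  intro s k _
  unfold Spec_maxVowels_Brute
  exact maxVowels_eq_alt s k
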